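-- pv_equiv track=rewrite | github.com/seanahrens/unarxiv | unarxiv-web/modal_worker/regex_scripter/latex_parser.py | _drop_braced_command
-- ===== SOURCE A (Python) =====
-- def _skip_braced_group(text: str, pos: int) -> int:
--     """Advance past a {...} group starting at pos."""
--     if pos >= len(text) or text[pos] != "{":
--         return pos
--     depth = 1
--     i = pos + 1
--     while i < len(text) and depth:
--         depth += (text[i] == "{") - (text[i] == "}")
--         i += 1
--     return i
--
-- def _skip_bracketed_group(text: str, pos: int) -> int:
--     """Advance past an optional [...] group starting at pos."""
--     if pos >= len(text) or text[pos] != "[":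
--         return pos
--     depth = 1
--     i = pos + 1
--     while i < len(text) and depth:
--         if text[i] == "[":
--             depth += 1
--         elif text[i] == "]":
--             depth -= 1
--         i += 1
--     return i
--
-- def _drop_braced_command(text: str, command: str) -> str:
--     """Remove all \\command{...} from text, handling nested braces."""
--     result = []
--     i = 0
--     needle = "\\" + command
--     while i < len(text):
--         if text[i:i + len(needle)] == needle and (
--             i + len(needle) >= len(text) or not text[i + len(needle)].isalpha()
--         ):
--             i += len(needle)
--             # skip optional [...] then required {...}
--             while i < len(text) and text[i] in " \t\n":
--                 i += 1
--             i = _skip_bracketed_group(text, i)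
--             i = _skip_braced_group(text, i)
--         else:
--             result.append(text[i])
--             i += 1
--     return "".join(result)
-- ===== SOURCE B (Python) =====
-- def _skip_group(text, pos, open_ch, close_ch):
--     """Advance past a balanced open_ch...close_ch group starting at pos."""
--     if pos >= len(text) or text[pos] != open_ch:
--         return pos
--     depth = 1
--     i = pos + 1
--     while i < len(text) and depth:
--         if text[i] == open_ch:
--             depth += 1
--         elif text[i] == close_ch:
--             depth -= 1
--         i += 1
--     return i
--
-- def _drop_braced_command(text: str, command: str) -> str:
--     """Remove all \\command{...} from text, handling nested braces.
--     Uses str.find to jump between occurrences and bulk-copies the spans in between."""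
--     needle = "\\" + command
--     n = len(text)
--     parts = []
--     i = 0
--     while i < n:
--         j = text.find(needle, i)
--         if j == -1:
--             parts.append(text[i:])
--             break
--         parts.append(text[i:j])
--         k = j + len(needle)
--         if k < n and text[k].isalpha():
--             # a longer command name: this occurrence does not count
--             parts.append(text[j])
--             i = j + 1
--             continue
--         while k < n and text[k] in " \t\n":
--             k += 1
--         k = _skip_group(text, k, "[", "]")
--         k = _skip_group(text, k, "{", "}")
--         i = k
--     return "".join(parts)
-- ===== Notes on version B (the rewrite author's own statement) =====
-- stated objective: faster
-- what changed: Instead of comparing a slice text[i:i+len(needle)] against the needle at every single position, B uses str.find to jump directly to the next needle occurrence and bulk-copies the whole span in between, so the per-position slice comparison disappears.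
import Mathlib
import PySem

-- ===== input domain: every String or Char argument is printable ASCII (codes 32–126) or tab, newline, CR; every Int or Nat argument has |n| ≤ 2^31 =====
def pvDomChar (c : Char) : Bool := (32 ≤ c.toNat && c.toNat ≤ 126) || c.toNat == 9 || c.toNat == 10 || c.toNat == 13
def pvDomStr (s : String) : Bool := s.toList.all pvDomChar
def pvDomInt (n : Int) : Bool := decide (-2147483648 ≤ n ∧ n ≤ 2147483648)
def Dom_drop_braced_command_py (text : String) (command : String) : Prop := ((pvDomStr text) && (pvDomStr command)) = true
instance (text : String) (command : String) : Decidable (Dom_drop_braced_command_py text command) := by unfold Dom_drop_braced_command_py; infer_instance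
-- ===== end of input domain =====

-- B replaces A's per-position slice comparison with str.find jumps and bulk span copies; proved equal on all inputs. (B's port represents Source B's cursor i by the suffix text[i:]; while-loops are ported as structural recursion on a fuel bound.)


-- ===== PORT A =====
-- Source A works with an integer cursor i into text; the port keeps that cursor as a Nat index.
-- Every while-loop is structural recursion on a fuel argument that over-approximates the
-- remaining iteration count (each iteration advances the cursor, so cs.length fuel suffices).
-- the inline `while i < n and text[i] in " \t\n"` loop of Source A's main loop
def skipWs (cs : List Char) : Nat → Nat → Nat
  | 0, i => i
  | fuel + 1, i =>
    if i < cs.length ∧ (cs.getD i ' ' = ' ' ∨ cs.getD i ' ' = '\t' ∨ cs.getD i ' ' = '\n') then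
      skipWs cs fuel (i + 1)
    else i

-- Source A _skip_braced_group's while loop: depth += (text[i]=="{") - (text[i]=="}")
def skipBracedLoopA (cs : List Char) : Nat → Int → Nat → Nat
  | 0, _, i => i
  | fuel + 1, depth, i =>
    if i < cs.length ∧ depth ≠ 0 then
      skipBracedLoopA cs fuel
        (depth + (if cs.getD i ' ' = '{' then 1 else 0) - (if cs.getD i ' ' = '}' then 1 else 0))
        (i + 1)
    else i

def skipBracedA (cs : List Char) (pos : Nat) : Nat :=
  if pos < cs.length ∧ cs.getD pos ' ' = '{' then skipBracedLoopA cs cs.length 1 (pos + 1) else pos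

-- Source A _skip_bracketed_group's while loop: if/elif depth update
def skipBracketLoopA (cs : List Char) : Nat → Int → Nat → Nat
  | 0, _, i => i
  | fuel + 1, depth, i =>
    if i < cs.length ∧ depth ≠ 0 then
      skipBracketLoopA cs fuel
        (if cs.getD i ' ' = '[' then depth + 1 else if cs.getD i ' ' = ']' then depth - 1 else depth)
        (i + 1)
    else i

def skipBracketA (cs : List Char) (pos : Nat) : Nat :=
  if pos < cs.length ∧ cs.getD pos ' ' = '[' then skipBracketLoopA cs cs.length 1 (pos + 1) else pos

-- Source A's main while loop: per-position slice comparison text[i:i+len(needle)] == needle,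
-- needle = '\' + command is passed as head c0 = '\' and tail nrest = command.toList
def dropLoopA (cs : List Char) (c0 : Char) (nrest : List Char) : Nat → Nat → List Char
  | 0, _ => []
  | fuel + 1, i =>
    if i < cs.length then
      if (cs.drop i).take (c0 :: nrest).length = c0 :: nrest ∧
          (cs.length ≤ i + (c0 :: nrest).length ∨
            PySem.Chars.isalpha (cs.getD (i + (c0 :: nrest).length) ' ') = false) then
        dropLoopA cs c0 nrest fuel
          (skipBracedA cs (skipBracketA cs (skipWs cs cs.length (i + (c0 :: nrest).length))))
      else
        cs.getD i ' ' :: dropLoopA cs c0 nrest fuel (i + 1)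
    else []

def drop_braced_command_py (text : String) (command : String) : String :=
  String.ofList (dropLoopA text.toList '\\' command.toList text.toList.length 0)

-- ===== PORT B =====
-- Source B's integer cursor i is represented here by the SUFFIX text[i:], so every step of Source B
-- becomes structural list processing: text.find(needle, i) becomes find on the suffix,
-- the bulk copy parts.append(text[i:j]) becomes `take`, and index advances become `drop`.
-- Source B _skip_group's depth loop, on the suffix just after the opening bracket
def eatDepth (o c : Char) : Nat → List Char → List Char
  | 0, s => s
  | _ + 1, [] => []
  | d + 1, x :: s => eatDepth o c (if x = o then d + 2 else if x = c then d else d + 1) s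

-- Source B _skip_group, on the suffix starting at pos
def eatGroup (o c : Char) : List Char → List Char
  | [] => []
  | x :: s => if x = o then eatDepth o c 1 s else x :: s

-- Source B's inline `while k < n and text[k] in " \t\n"` loop, on the suffix starting at k
def eatWs : List Char → List Char
  | [] => []
  | x :: s => if x = ' ' ∨ x = '\t' ∨ x = '\n' then eatWs s else x :: s

-- Source B's main while loop on the remaining suffix s = text[i:], structural on a fuel bound
-- (each round consumes at least one character, so length + 1 fuel suffices):
-- j = text.find(needle, i) is find on s (offset relative to s); text[i:j] is `take`;
-- the boundary test `k < n and text[k].isalpha()` reads the head of the suffix after the needle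
-- (headD ' ': ' ' is not alphabetic, matching the k == n case).
def dropSpansB (c0 : Char) (nrest : List Char) : Nat → List Char → List Char
  | 0, s => s
  | fuel + 1, s =>
    if PySem.Chars.find s (c0 :: nrest) = -1 then s
    else
      (s.take (PySem.Chars.find s (c0 :: nrest)).toNat) ++
        (if PySem.Chars.isalpha
              ((s.drop ((PySem.Chars.find s (c0 :: nrest)).toNat + (c0 :: nrest).length)).headD ' ')
            = true then
          s.getD (PySem.Chars.find s (c0 :: nrest)).toNat ' ' ::
            dropSpansB c0 nrest fuel (s.drop ((PySem.Chars.find s (c0 :: nrest)).toNat + 1))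
        else
          dropSpansB c0 nrest fuel (eatGroup '{' '}' (eatGroup '[' ']'
            (eatWs (s.drop ((PySem.Chars.find s (c0 :: nrest)).toNat + (c0 :: nrest).length))))))

def drop_braced_command_py_alt (text : String) (command : String) : String :=
  String.ofList (dropSpansB '\\' command.toList (text.toList.length + 1) text.toList)

-- ===== PRECONDITION & SPEC =====
def Spec_drop_braced_command_py (text : String) (command : String) (out : String) : Prop := out = drop_braced_command_py_alt text command
instance (text : String) (command : String) (out : String) : Decidable (Spec_drop_braced_command_py text command out) := by unfold Spec_drop_braced_command_py; infer_instance

-- ===== CLAIM (what is proved, stated in full; the proofs are below) =====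
def Claim_equal_drop_braced_command_py : Prop := ∀ (text : String) (command : String), Dom_drop_braced_command_py text command → Spec_drop_braced_command_py text command (drop_braced_command_py text command)

-- ===== LEMMAS AND PROOFS =====

theorem le_skipWs (cs : List Char) (fuel i : Nat) : i ≤ skipWs cs fuel i := by
  induction fuel generalizing i with
  | zero => exact Nat.le_refl i
  | succ fuel ih =>
    simp only [skipWs]
    split
    · have := ih (i + 1); omega
    · exact Nat.le_refl i

theorem le_skipBracedLoopA (cs : List Char) (fuel : Nat) (depth : Int) (i : Nat) :
    i ≤ skipBracedLoopA cs fuel depth i := by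
  induction fuel generalizing depth i with
  | zero => exact Nat.le_refl i
  | succ fuel ih =>
    simp only [skipBracedLoopA]
    split
    · exact Nat.le_trans (Nat.le_succ i) (ih _ (i + 1))
    · exact Nat.le_refl i

theorem le_skipBracedA (cs : List Char) (pos : Nat) : pos ≤ skipBracedA cs pos := by
  unfold skipBracedA
  split
  · have := le_skipBracedLoopA cs cs.length 1 (pos + 1); omega
  · exact Nat.le_refl pos

theorem le_skipBracketLoopA (cs : List Char) (fuel : Nat) (depth : Int) (i : Nat) :
    i ≤ skipBracketLoopA cs fuel depth i := by
  induction fuel generalizing depth i with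
  | zero => exact Nat.le_refl i
  | succ fuel ih =>
    simp only [skipBracketLoopA]
    split
    · exact Nat.le_trans (Nat.le_succ i) (ih _ (i + 1))
    · exact Nat.le_refl i

theorem le_skipBracketA (cs : List Char) (pos : Nat) : pos ≤ skipBracketA cs pos := by
  unfold skipBracketA
  split
  · have := le_skipBracketLoopA cs cs.length 1 (pos + 1); omega
  · exact Nat.le_refl pos

theorem eatWs_drop (cs : List Char) (fuel i : Nat) (hfu : cs.length - i ≤ fuel) :
    cs.drop (skipWs cs fuel i) = eatWs (cs.drop i) := by
  induction fuel generalizing i with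
  | zero =>
    simp only [skipWs]
    rw [List.drop_eq_nil_of_le (by omega)]
    simp [eatWs]
  | succ fuel ih =>
    simp only [skipWs]
    split
    · next h =>
      rw [ih (i + 1) (by omega), List.drop_eq_getElem_cons h.1]
      simp only [eatWs]
      rw [if_pos (by have := h.2; rwa [List.getD_eq_getElem cs ' ' h.1] at this)]
    · next h =>
      by_cases hi : i < cs.length
      · rw [List.drop_eq_getElem_cons hi]
        simp only [eatWs]
        rw [if_neg (fun hc => h ⟨hi, by rwa [List.getD_eq_getElem cs ' ' hi]⟩)]
      · rw [List.drop_eq_nil_of_le (by omega)]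
        simp [eatWs]

theorem eatDepth_bracket_drop (cs : List Char) (fuel : Nat) (d : Int) (i : Nat)
    (hd : 0 ≤ d) (hfu : cs.length - i ≤ fuel) :
    cs.drop (skipBracketLoopA cs fuel d i) = eatDepth '[' ']' d.toNat (cs.drop i) := by
  induction fuel generalizing d i with
  | zero =>
    simp only [skipBracketLoopA]
    rw [List.drop_eq_nil_of_le (by omega)]
    rcases Nat.eq_zero_or_pos d.toNat with h | h
    · rw [h]; simp [eatDepth]
    · obtain ⟨k, hk⟩ : ∃ k, d.toNat = k + 1 := ⟨d.toNat - 1, by omega⟩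
      rw [hk]; simp [eatDepth]
  | succ fuel ih =>
    simp only [skipBracketLoopA]
    split
    · next h =>
      have hgd : cs.getD i ' ' = cs[i] := List.getD_eq_getElem cs ' ' h.1
      rw [ih _ (i + 1) (by split_ifs <;> omega) (by omega), List.drop_eq_getElem_cons h.1]
      obtain ⟨k, hk⟩ : ∃ k, d.toNat = k + 1 := ⟨d.toNat - 1, by omega⟩
      rw [hk]
      simp only [eatDepth]
      congr 1
      rw [hgd]
      split_ifs <;> omega
    · next h =>
      by_cases hd0 : d = 0
      · subst hd0; simp [eatDepth]
      · have hi : ¬ i < cs.length := fun hc => h ⟨hc, hd0⟩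
        rw [List.drop_eq_nil_of_le (by omega)]
        obtain ⟨k, hk⟩ : ∃ k, d.toNat = k + 1 := ⟨d.toNat - 1, by omega⟩
        rw [hk]
        simp [eatDepth]

theorem eatDepth_braced_drop (cs : List Char) (fuel : Nat) (d : Int) (i : Nat)
    (hd : 0 ≤ d) (hfu : cs.length - i ≤ fuel) :
    cs.drop (skipBracedLoopA cs fuel d i) = eatDepth '{' '}' d.toNat (cs.drop i) := by
  induction fuel generalizing d i with
  | zero =>
    simp only [skipBracedLoopA]
    rw [List.drop_eq_nil_of_le (by omega)]
    rcases Nat.eq_zero_or_pos d.toNat with h | h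
    · rw [h]; simp [eatDepth]
    · obtain ⟨k, hk⟩ : ∃ k, d.toNat = k + 1 := ⟨d.toNat - 1, by omega⟩
      rw [hk]; simp [eatDepth]
  | succ fuel ih =>
    simp only [skipBracedLoopA]
    split
    · next h =>
      have hgd : cs.getD i ' ' = cs[i] := List.getD_eq_getElem cs ' ' h.1
      rw [ih _ (i + 1) (by split_ifs <;> omega) (by omega), List.drop_eq_getElem_cons h.1]
      obtain ⟨k, hk⟩ : ∃ k, d.toNat = k + 1 := ⟨d.toNat - 1, by omega⟩
      rw [hk]
      simp only [eatDepth]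
      congr 1
      rw [hgd]
      split_ifs with h1 h2 <;> first | omega | (exact absurd (h1 ▸ h2) (by decide))
    · next h =>
      by_cases hd0 : d = 0
      · subst hd0; simp [eatDepth]
      · have hi : ¬ i < cs.length := fun hc => h ⟨hc, hd0⟩
        rw [List.drop_eq_nil_of_le (by omega)]
        obtain ⟨k, hk⟩ : ∃ k, d.toNat = k + 1 := ⟨d.toNat - 1, by omega⟩
        rw [hk]
        simp [eatDepth]

theorem eatGroup_bracket_drop (cs : List Char) (pos : Nat) :
    cs.drop (skipBracketA cs pos) = eatGroup '[' ']' (cs.drop pos) := by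
  unfold skipBracketA
  split
  · next h =>
    rw [eatDepth_bracket_drop cs cs.length 1 (pos + 1) (by omega) (by omega),
      List.drop_eq_getElem_cons h.1]
    simp only [eatGroup]
    rw [if_pos (by have := h.2; rwa [List.getD_eq_getElem cs ' ' h.1] at this)]
    norm_num
  · next h =>
    by_cases hi : pos < cs.length
    · rw [List.drop_eq_getElem_cons hi]
      simp only [eatGroup]
      rw [if_neg (fun hc => h ⟨hi, by rwa [List.getD_eq_getElem cs ' ' hi]⟩)]
    · rw [List.drop_eq_nil_of_le (by omega)]
      simp [eatGroup]

theorem eatGroup_braced_drop (cs : List Char) (pos : Nat) :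
    cs.drop (skipBracedA cs pos) = eatGroup '{' '}' (cs.drop pos) := by
  unfold skipBracedA
  split
  · next h =>
    rw [eatDepth_braced_drop cs cs.length 1 (pos + 1) (by omega) (by omega),
      List.drop_eq_getElem_cons h.1]
    simp only [eatGroup]
    rw [if_pos (by have := h.2; rwa [List.getD_eq_getElem cs ' ' h.1] at this)]
    norm_num
  · next h =>
    by_cases hi : pos < cs.length
    · rw [List.drop_eq_getElem_cons hi]
      simp only [eatGroup]
      rw [if_neg (fun hc => h ⟨hi, by rwa [List.getD_eq_getElem cs ' ' hi]⟩)]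
    · rw [List.drop_eq_nil_of_le (by omega)]
      simp [eatGroup]

theorem eatDepth_length_le (o c : Char) (d : Nat) (s : List Char) :
    (eatDepth o c d s).length ≤ s.length := by
  induction s generalizing d with
  | nil => cases d <;> simp [eatDepth]
  | cons x s ih =>
    cases d with
    | zero => simp [eatDepth]
    | succ d =>
      calc (eatDepth o c (d + 1) (x :: s)).length
          ≤ s.length := ih _
        _ ≤ (x :: s).length := by simp

theorem eatGroup_length_le (o c : Char) (s : List Char) :
    (eatGroup o c s).length ≤ s.length := by
  cases s with
  | nil => simp [eatGroup]
  | cons x s =>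
    simp only [eatGroup]
    split
    · calc (eatDepth o c 1 s).length ≤ s.length := eatDepth_length_le o c 1 s
        _ ≤ (x :: s).length := by simp
    · exact Nat.le_refl _

theorem eatWs_length_le (s : List Char) : (eatWs s).length ≤ s.length := by
  induction s with
  | nil => simp [eatWs]
  | cons x s ih =>
    simp only [eatWs]
    split
    · calc (eatWs s).length ≤ s.length := ih
        _ ≤ (x :: s).length := by simp
    · exact Nat.le_refl _

-- one controlled unfolding step of dropSpansB at successor fuel
theorem dropSpansB_succ (c0 : Char) (nrest : List Char) (fuel : Nat) (s : List Char) :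
    dropSpansB c0 nrest (fuel + 1) s =
      if PySem.Chars.find s (c0 :: nrest) = -1 then s
      else
        (s.take (PySem.Chars.find s (c0 :: nrest)).toNat) ++
          (if PySem.Chars.isalpha
                ((s.drop ((PySem.Chars.find s (c0 :: nrest)).toNat + (c0 :: nrest).length)).headD ' ')
              = true then
            s.getD (PySem.Chars.find s (c0 :: nrest)).toNat ' ' ::
              dropSpansB c0 nrest fuel (s.drop ((PySem.Chars.find s (c0 :: nrest)).toNat + 1))
          else
            dropSpansB c0 nrest fuel (eatGroup '{' '}' (eatGroup '[' ']'
              (eatWs (s.drop ((PySem.Chars.find s (c0 :: nrest)).toNat + (c0 :: nrest).length)))))) := rfl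

-- with enough fuel, dropSpansB does not depend on the exact fuel value
theorem dropSpansB_fuel (c0 : Char) (nrest : List Char) :
    ∀ (f1 : Nat) (s : List Char) (f2 : Nat), s.length < f1 → s.length < f2 →
      dropSpansB c0 nrest f1 s = dropSpansB c0 nrest f2 s := by
  intro f1
  induction f1 with
  | zero => intro s f2 h1; omega
  | succ f1 ih =>
    intro s f2 h1 h2
    obtain ⟨g2, rfl⟩ : ∃ g2, f2 = g2 + 1 := ⟨f2 - 1, by omega⟩
    rw [dropSpansB_succ c0 nrest f1 s, dropSpansB_succ c0 nrest g2 s]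
    split
    · rfl
    · next hf =>
      have h0 : (0 : Int) ≤ PySem.Chars.find s (c0 :: nrest) := by
        have := PySem.Chars.neg_one_le_find s (c0 :: nrest); omega
      obtain ⟨hpre, -⟩ := PySem.Chars.find_spec (s := s) (sub := c0 :: nrest) h0
      have hlen : (PySem.Chars.find s (c0 :: nrest)).toNat + (c0 :: nrest).length ≤ s.length := by
        have := hpre.length_le
        simp only [List.length_drop] at this
        have hfl := PySem.Chars.find_le_length s (c0 :: nrest)
        omega
      simp only [List.length_cons] at hlen
      congr 1
      split
      · congr 1
        exact ih _ _ (by simp only [List.length_drop]; omega)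
          (by simp only [List.length_drop]; omega)
      · refine ih _ _ ?_ ?_ <;>
        · have e1 := eatWs_length_le (s.drop ((PySem.Chars.find s (c0 :: nrest)).toNat + (c0 :: nrest).length))
          have e2 := eatGroup_length_le '[' ']' (eatWs (s.drop ((PySem.Chars.find s (c0 :: nrest)).toNat + (c0 :: nrest).length)))
          have e3 := eatGroup_length_le '{' '}' (eatGroup '[' ']' (eatWs (s.drop ((PySem.Chars.find s (c0 :: nrest)).toNat + (c0 :: nrest).length))))
          simp only [List.length_drop, List.length_cons] at *
          omega

-- if the first occurrence is not at position 0, dropSpansB copies the head and recurses on the tail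
theorem dropSpansB_cons (c0 : Char) (nrest : List Char) (x : Char) (t : List Char) (g : Nat)
    (hg : t.length < g)
    (hf : PySem.Chars.find (x :: t) (c0 :: nrest) ≠ -1)
    (hj0 : (PySem.Chars.find (x :: t) (c0 :: nrest)).toNat ≠ 0) :
    dropSpansB c0 nrest (g + 1) (x :: t) = x :: dropSpansB c0 nrest g t := by
  have h0 : (0 : Int) ≤ PySem.Chars.find (x :: t) (c0 :: nrest) := by
    have := PySem.Chars.neg_one_le_find (x :: t) (c0 :: nrest); omega
  obtain ⟨hpre, hmin⟩ := PySem.Chars.find_spec (s := x :: t) (sub := c0 :: nrest) h0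
  obtain ⟨k, hk⟩ : ∃ k, (PySem.Chars.find (x :: t) (c0 :: nrest)).toNat = k + 1 :=
    ⟨(PySem.Chars.find (x :: t) (c0 :: nrest)).toNat - 1, by omega⟩
  rw [hk] at hpre hmin
  simp only [List.drop_succ_cons] at hpre
  have hkt : k + (c0 :: nrest).length ≤ t.length := by
    have := hpre.length_le
    simp only [List.length_drop, List.length_cons] at this ⊢
    omega
  have hft : PySem.Chars.find t (c0 :: nrest) ≠ -1 := by
    rw [Ne, PySem.Chars.find_eq_neg_one_iff]
    intro hn
    exact hn (hpre.isInfix.trans (List.drop_suffix k t).isInfix)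
  have h0' : (0 : Int) ≤ PySem.Chars.find t (c0 :: nrest) := by
    have := PySem.Chars.neg_one_le_find t (c0 :: nrest); omega
  obtain ⟨hpre2, hmin2⟩ := PySem.Chars.find_spec (s := t) (sub := c0 :: nrest) h0'
  have hj' : (PySem.Chars.find t (c0 :: nrest)).toNat = k := by
    rcases Nat.lt_trichotomy (PySem.Chars.find t (c0 :: nrest)).toNat k with h | h | h
    · exfalso
      have e : t.drop (PySem.Chars.find t (c0 :: nrest)).toNat
          = (x :: t).drop ((PySem.Chars.find t (c0 :: nrest)).toNat + 1) := by simp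
      exact hmin _ (by omega) (e ▸ hpre2)
    · exact h
    · exact absurd hpre (hmin2 k h)
  rw [dropSpansB_succ c0 nrest g (x :: t), if_neg hf]
  obtain ⟨g', rfl⟩ : ∃ g', g = g' + 1 := ⟨g - 1, by omega⟩
  conv_rhs => rw [dropSpansB_succ c0 nrest g' t]
  rw [if_neg hft, hk, hj',
    (by omega : k + 1 + (c0 :: nrest).length = (k + (c0 :: nrest).length) + 1)]
  simp only [List.take_succ_cons, List.drop_succ_cons, List.getD_cons_succ, List.cons_append]
  congr 2
  split
  · congr 1
    exact dropSpansB_fuel c0 nrest _ _ _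
      (by simp only [List.length_drop, List.length_cons] at *; omega)
      (by simp only [List.length_drop, List.length_cons] at *; omega)
  · have e1 := eatWs_length_le (t.drop (k + (c0 :: nrest).length))
    have e2 := eatGroup_length_le '[' ']' (eatWs (t.drop (k + (c0 :: nrest).length)))
    have e3 := eatGroup_length_le '{' '}' (eatGroup '[' ']' (eatWs (t.drop (k + (c0 :: nrest).length))))
    exact dropSpansB_fuel c0 nrest _ _ _
      (by simp only [List.length_drop, List.length_cons] at *; omega)
      (by simp only [List.length_drop, List.length_cons] at *; omega)

theorem dropLoop_eq_aux (cs : List Char) (c0 : Char) (nrest : List Char) :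
    ∀ (f i g : Nat), cs.length - i ≤ f → cs.length - i < g →
      dropLoopA cs c0 nrest f i = dropSpansB c0 nrest g (cs.drop i) := by
  intro f
  induction f with
  | zero =>
    intro i g hfu hg
    obtain ⟨g', rfl⟩ : ∃ g', g = g' + 1 := ⟨g - 1, by omega⟩
    rw [List.drop_eq_nil_of_le (by omega)]
    simp only [dropLoopA]
    rw [dropSpansB_succ, if_pos ((PySem.Chars.find_eq_neg_one_iff _ _).mpr (by simp))]
  | succ f ih =>
    intro i g hfu hg
    obtain ⟨g', rfl⟩ : ∃ g', g = g' + 1 := ⟨g - 1, by omega⟩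
    have hglen : cs.length - i ≤ g' := by omega
    by_cases hi : i < cs.length
    · have hcons : cs.drop i = cs[i] :: cs.drop (i + 1) := List.drop_eq_getElem_cons hi
      have hdroplen : (cs.drop i).length = cs.length - i := by simp
      by_cases hf : PySem.Chars.find (cs.drop i) (c0 :: nrest) = -1
      · -- no occurrence from i on: A copies char by char, B returns the suffix unchanged
        have hninf : ¬ (c0 :: nrest) <:+: cs.drop i :=
          (PySem.Chars.find_eq_neg_one_iff _ _).mp hf
        have hcond : ¬ ((cs.drop i).take (c0 :: nrest).length = c0 :: nrest ∧
            (cs.length ≤ i + (c0 :: nrest).length ∨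
              PySem.Chars.isalpha (cs.getD (i + (c0 :: nrest).length) ' ') = false)) := by
          rintro ⟨h1, -⟩
          exact hninf (List.prefix_iff_eq_take.mpr h1.symm).isInfix
        have hf' : PySem.Chars.find (cs.drop (i + 1)) (c0 :: nrest) = -1 := by
          rw [PySem.Chars.find_eq_neg_one_iff]
          intro h
          have hsfx : cs.drop (i + 1) <:+ cs.drop i := ⟨[cs[i]], by rw [hcons]; rfl⟩
          exact hninf (h.trans hsfx.isInfix)
        have hB1 : dropSpansB c0 nrest ((cs.length - (i + 1)) + 1) (cs.drop (i + 1))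
            = cs.drop (i + 1) := by
          rw [dropSpansB_succ, if_pos hf']
        have hB0 : dropSpansB c0 nrest (g' + 1) (cs.drop i) = cs.drop i := by
          rw [dropSpansB_succ, if_pos hf]
        simp only [dropLoopA]
        rw [if_pos hi, if_neg hcond,
          ih (i + 1) ((cs.length - (i + 1)) + 1) (by omega) (by omega), hB1, hB0, hcons,
          List.getD_eq_getElem cs ' ' hi]
      · have h0 : (0 : Int) ≤ PySem.Chars.find (cs.drop i) (c0 :: nrest) := by
          have := PySem.Chars.neg_one_le_find (cs.drop i) (c0 :: nrest); omega
        obtain ⟨hpre, hmin⟩ := PySem.Chars.find_spec (s := cs.drop i) (sub := c0 :: nrest) h0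
        by_cases hj0 : (PySem.Chars.find (cs.drop i) (c0 :: nrest)).toNat = 0
        · -- the occurrence is right here: A's slice comparison succeeds
          have hpre0 : (c0 :: nrest) <+: cs.drop i := by rw [hj0] at hpre; simpa using hpre
          have hcond1 : (cs.drop i).take (c0 :: nrest).length = c0 :: nrest :=
            (List.prefix_iff_eq_take.mp hpre0).symm
          have hLle : i + (c0 :: nrest).length ≤ cs.length := by
            have := hpre0.length_le
            simp only [List.length_drop, List.length_cons] at this
            simp only [List.length_cons]
            omega
          have hhead : ((cs.drop i).drop (c0 :: nrest).length).headD ' '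
              = cs.getD (i + (c0 :: nrest).length) ' ' := by
            rw [List.drop_drop]
            by_cases h : i + (c0 :: nrest).length < cs.length
            · rw [List.drop_eq_getElem_cons h, List.getD_eq_getElem cs ' ' h]; rfl
            · rw [List.drop_eq_nil_of_le (by omega), List.getD_eq_default cs ' ' (by omega)]; rfl
          by_cases hba : PySem.Chars.isalpha (cs.getD (i + (c0 :: nrest).length) ' ') = true
          · -- boundary letter: not a real match; both copy one char and move on
            have hcond : ¬ ((cs.drop i).take (c0 :: nrest).length = c0 :: nrest ∧
                (cs.length ≤ i + (c0 :: nrest).length ∨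
                  PySem.Chars.isalpha (cs.getD (i + (c0 :: nrest).length) ' ') = false)) := by
              rintro ⟨-, h2 | h2⟩
              · have : cs.getD (i + (c0 :: nrest).length) ' ' = ' ' :=
                  List.getD_eq_default cs ' ' (by omega)
                rw [this] at hba
                exact absurd hba (by decide)
              · rw [hba] at h2; cases h2
            simp only [dropLoopA]
            rw [if_pos hi, if_neg hcond, ih (i + 1) g' (by omega) (by omega)]
            conv_rhs => rw [dropSpansB_succ c0 nrest g' (cs.drop i)]
            rw [if_neg hf]
            simp only [hj0, List.take_zero, List.nil_append, Nat.zero_add]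
            rw [hhead, if_pos hba, List.drop_drop, hcons]
            simp only [List.getD_cons_zero]
            rw [List.getD_eq_getElem cs ' ' hi]
          · -- a real match: both skip whitespace and the two groups identically
            have hcond2 : cs.length ≤ i + (c0 :: nrest).length ∨
                PySem.Chars.isalpha (cs.getD (i + (c0 :: nrest).length) ' ') = false :=
              Or.inr (by simpa using hba)
            have h1 := le_skipWs cs cs.length (i + (c0 :: nrest).length)
            have h2 := le_skipBracketA cs (skipWs cs cs.length (i + (c0 :: nrest).length))
            have h3 := le_skipBracedA cs (skipBracketA cs (skipWs cs cs.length (i + (c0 :: nrest).length)))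
            simp only [dropLoopA]
            rw [if_pos hi, if_pos ⟨hcond1, hcond2⟩,
              ih _ g' (by simp only [List.length_cons] at *; omega)
                (by simp only [List.length_cons] at *; omega)]
            conv_rhs => rw [dropSpansB_succ c0 nrest g' (cs.drop i)]
            rw [if_neg hf]
            simp only [hj0, List.take_zero, List.nil_append, Nat.zero_add]
            rw [hhead, if_neg (by simpa using hba), List.drop_drop,
              ← eatWs_drop cs cs.length (i + (c0 :: nrest).length)
                (by simp only [List.length_cons]; omega),
              ← eatGroup_bracket_drop, ← eatGroup_braced_drop]
        · -- the occurrence is further right: A copies one char, B's copied span loses its head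
          have hcond : ¬ ((cs.drop i).take (c0 :: nrest).length = c0 :: nrest ∧
              (cs.length ≤ i + (c0 :: nrest).length ∨
                PySem.Chars.isalpha (cs.getD (i + (c0 :: nrest).length) ' ') = false)) := by
            rintro ⟨h1, -⟩
            exact hmin 0 (by omega) (by simpa using List.prefix_iff_eq_take.mpr h1.symm)
          simp only [dropLoopA]
          rw [if_pos hi, if_neg hcond, ih (i + 1) g' (by omega) (by omega)]
          conv_rhs => rw [hcons]
          rw [dropSpansB_cons c0 nrest _ _ g'
              (by simp only [List.length_drop]; omega)
              (by rw [← hcons]; exact hf) (by rw [← hcons]; exact hj0),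
            List.getD_eq_getElem cs ' ' hi]
    · simp only [dropLoopA]
      rw [if_neg hi, List.drop_eq_nil_of_le (by omega), dropSpansB_succ,
        if_pos ((PySem.Chars.find_eq_neg_one_iff _ _).mpr (by simp))]

-- ===== VERDICT (by name: the statement is the Claim_ definition above) =====
theorem drop_braced_command_py_spec : Claim_equal_drop_braced_command_py := by
  intro text command _
  unfold Spec_drop_braced_command_py drop_braced_command_py drop_braced_command_py_alt
  have := dropLoop_eq_aux text.toList '\\' command.toList text.toList.length 0
    (text.toList.length + 1) (by omega) (by omega)
  rw [List.drop_zero] at this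
  exact congrArg String.ofList this
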